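-- pv_equiv track=rewrite | github.com/liskos/leletko | ege27/63.py | clasterizatoin1
-- ===== SOURCE A (Python) =====
-- def clasterizatoin1(data):
--     clasters = [[], [], []]
--     for x,y in data:
--         if x < 5:
--             clasters[0].append([x,y])
--         elif y > 5:
--             clasters[1].append([x,y])
--         else:
--             clasters[2].append([x,y])
--     return clasters
-- ===== SOURCE B (Python) =====
-- def clasterizatoin1(data):
--     labeled = sorted(((0 if x < 5 else 1 if y > 5 else 2, [x, y]) for x, y in data),
--                      key=lambda t: t[0])
--     keys = [k for k, _ in labeled]
--     pts = [p for _, p in labeled]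
--     n0 = keys.count(0)
--     n01 = n0 + keys.count(1)
--     return [pts[:n0], pts[n0:n01], pts[n01:]]
-- ===== Notes on version B (the rewrite author's own statement) =====
-- stated objective: alternative
-- what changed: Instead of one branch-and-append pass, B labels each point with its cluster index, stable-sorts the labeled list by the label, and slices the sorted point list into the three clusters by counting labels.
import Mathlib
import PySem

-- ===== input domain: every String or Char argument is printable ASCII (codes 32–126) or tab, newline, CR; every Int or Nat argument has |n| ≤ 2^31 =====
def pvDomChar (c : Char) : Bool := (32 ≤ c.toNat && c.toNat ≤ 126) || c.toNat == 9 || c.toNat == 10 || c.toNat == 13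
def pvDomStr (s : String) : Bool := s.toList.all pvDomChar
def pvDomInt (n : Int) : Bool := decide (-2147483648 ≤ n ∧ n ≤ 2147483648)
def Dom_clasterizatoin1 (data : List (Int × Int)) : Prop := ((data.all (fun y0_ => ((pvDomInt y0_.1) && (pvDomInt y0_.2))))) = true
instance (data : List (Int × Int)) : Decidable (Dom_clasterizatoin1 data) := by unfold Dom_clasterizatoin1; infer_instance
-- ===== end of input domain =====

-- B replaces A's single branch-and-append pass by labelling each point with its
-- cluster index, stable-sorting by the label, and slicing the sorted points by counts.

-- ===== PORT A =====
-- A's single loop keeps the three clusters as mutable state and appends to one of them per element.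
def clasterizatoin1Loop (st : List (List Int) × List (List Int) × List (List Int)) :
    List (Int × Int) → List (List Int) × List (List Int) × List (List Int)
  | [] => st
  | (x, y) :: rest =>
      if x < 5 then clasterizatoin1Loop (st.1 ++ [[x, y]], st.2.1, st.2.2) rest
      else if y > 5 then clasterizatoin1Loop (st.1, st.2.1 ++ [[x, y]], st.2.2) rest
      else clasterizatoin1Loop (st.1, st.2.1, st.2.2 ++ [[x, y]]) rest

def clasterizatoin1 (data : List (Int × Int)) : List (List (List Int)) :=
  let st := clasterizatoin1Loop ([], [], []) data
  [st.1, st.2.1, st.2.2]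

-- ===== PORT B =====
-- 0 if x < 5 else 1 if y > 5 else 2
def pvLabel (p : Int × Int) : Int := if p.1 < 5 then 0 else if p.2 > 5 then 1 else 2

def clasterizatoin1_alt (data : List (Int × Int)) : List (List (List Int)) :=
  let labeled := PySem.List.sorted (data.map (fun p => (pvLabel p, [p.1, p.2]))) (fun t => t.1) false
  let keys := labeled.map (fun t => t.1)
  let pts := labeled.map (fun t => t.2)
  let n0 : Int := (PySem.List.count keys 0 : Nat)
  let n01 : Int := n0 + (PySem.List.count keys 1 : Nat)
  [PySem.List.slice pts none (some n0),
   PySem.List.slice pts (some n0) (some n01),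
   PySem.List.slice pts (some n01) none]

-- ===== PRECONDITION & SPEC =====
def Spec_clasterizatoin1 (data : List (Int × Int)) (out : List (List (List Int))) : Prop := out = clasterizatoin1_alt data
instance (data : List (Int × Int)) (out : List (List (List Int))) : Decidable (Spec_clasterizatoin1 data out) := by unfold Spec_clasterizatoin1; infer_instance

-- ===== CLAIM (what is proved, stated in full; the proofs are below) =====
def Claim_equal_clasterizatoin1 : Prop := ∀ (data : List (Int × Int)), Dom_clasterizatoin1 data → Spec_clasterizatoin1 data (clasterizatoin1 data)

-- ===== LEMMAS AND PROOFS =====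

-- A's loop = the three filters, each mapped to [x,y].
theorem clasterizatoin1Loop_eq (data : List (Int × Int))
    (a b c : List (List Int)) :
    clasterizatoin1Loop (a, b, c) data =
      (a ++ (data.filter (fun p => pvLabel p == 0)).map (fun p => [p.1, p.2]),
       b ++ (data.filter (fun p => pvLabel p == 1)).map (fun p => [p.1, p.2]),
       c ++ (data.filter (fun p => pvLabel p == 2)).map (fun p => [p.1, p.2])) := by
  induction data generalizing a b c with
  | nil => simp [clasterizatoin1Loop]
  | cons hd tl ih =>
    obtain ⟨x, y⟩ := hd
    by_cases h1 : x < 5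
    · simp [clasterizatoin1Loop, h1, ih, List.filter, pvLabel]
    · by_cases h2 : y > 5
      · simp [clasterizatoin1Loop, h1, h2, ih, List.filter, pvLabel]
      · simp [clasterizatoin1Loop, h1, h2, ih, List.filter, pvLabel]

-- Inserting x between a prefix it is not before and a suffix it is before.
theorem insertBy_mid {α : Type} (before : α → α → Bool) (x : α) (L1 L2 : List α)
    (h1 : ∀ y ∈ L1, before x y = false) (h2 : ∀ y ∈ L2, before x y = true) :
    PySem.List.insertBy before x (L1 ++ L2) = L1 ++ x :: L2 := by
  induction L1 with
  | nil =>
    cases L2 with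
    | nil => simp [PySem.List.insertBy]
    | cons h t => simp [PySem.List.insertBy, h2 h (by simp)]
  | cons a L1 ih =>
    have ha : before x a = false := h1 a (by simp)
    simp [PySem.List.insertBy, ha]
    exact ih (fun y hy => h1 y (by simp [hy]))

def pvTag (p : Int × Int) : Int × List Int := (pvLabel p, [p.1, p.2])

def pvF (i : Int) (l : List (Int × Int)) : List (Int × List Int) :=
  (l.filter (fun p => pvLabel p == i)).map pvTag

theorem pvLabel_cases (p : Int × Int) : pvLabel p = 0 ∨ pvLabel p = 1 ∨ pvLabel p = 2 := by
  unfold pvLabel; split_ifs <;> simp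

-- The insertion-sort fold distributes labelled points into the three label blocks.
theorem sortFold_eq (l : List (Int × Int)) (A B C : List (Int × List Int))
    (hA : ∀ t ∈ A, t.1 = 0) (hB : ∀ t ∈ B, t.1 = 1) (hC : ∀ t ∈ C, t.1 = 2) :
    List.foldl (fun acc x => PySem.List.insertBy (fun a b => decide (a.1 < b.1)) x acc)
      (A ++ B ++ C) (l.map pvTag) =
      (A ++ pvF 0 l) ++ (B ++ pvF 1 l) ++ (C ++ pvF 2 l) := by
  induction l generalizing A B C with
  | nil => simp [pvF]
  | cons p tl ih =>
    rcases pvLabel_cases p with h | h | h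
    · have hins : PySem.List.insertBy (fun a b => decide (a.1 < b.1)) (pvTag p) (A ++ B ++ C)
          = (A ++ [pvTag p]) ++ B ++ C := by
        rw [List.append_assoc A B C,
          insertBy_mid _ _ A (B ++ C)
            (fun y hy => by simp [pvTag, hA y hy, h])
            (fun y hy => by
              rcases List.mem_append.1 hy with hy | hy
              · simp [pvTag, hB y hy, h]
              · simp [pvTag, hC y hy, h])]
        simp
      simp only [List.map, List.foldl, hins]
      rw [ih (A ++ [pvTag p]) B C
        (by intro t ht; rcases List.mem_append.1 ht with ht | ht
            · exact hA t ht
            · simp at ht; simp [ht, pvTag, h]) hB hC]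
      simp [pvF, List.filter, pvTag, h]
    · have hins : PySem.List.insertBy (fun a b => decide (a.1 < b.1)) (pvTag p) (A ++ B ++ C)
          = A ++ (B ++ [pvTag p]) ++ C := by
        rw [insertBy_mid _ _ (A ++ B) C
            (fun y hy => by
              rcases List.mem_append.1 hy with hy | hy
              · simp [pvTag, hA y hy, h]
              · simp [pvTag, hB y hy, h])
            (fun y hy => by simp [pvTag, hC y hy, h])]
        simp
      simp only [List.map, List.foldl, hins]
      rw [ih A (B ++ [pvTag p]) C hA
        (by intro t ht; rcases List.mem_append.1 ht with ht | ht
            · exact hB t ht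
            · simp at ht; simp [ht, pvTag, h]) hC]
      simp [pvF, List.filter, pvTag, h]
    · have hins : PySem.List.insertBy (fun a b => decide (a.1 < b.1)) (pvTag p) (A ++ B ++ C)
          = A ++ B ++ (C ++ [pvTag p]) := by
        rw [PySem.List.insertBy_of_forall_not_before _ _ (A ++ B ++ C)
            (fun y hy => by
              rcases List.mem_append.1 hy with hy | hy
              · rcases List.mem_append.1 hy with hy | hy
                · simp [pvTag, hA y hy, h]
                · simp [pvTag, hB y hy, h]
              · simp [pvTag, hC y hy, h])]
        simp
      simp only [List.map, List.foldl, hins]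
      rw [ih A B (C ++ [pvTag p]) hA hB
        (by intro t ht; rcases List.mem_append.1 ht with ht | ht
            · exact hC t ht
            · simp at ht; simp [ht, pvTag, h])]
      simp [pvF, List.filter, pvTag, h]

theorem sorted_eq_blocks (l : List (Int × Int)) :
    PySem.List.sorted (l.map (fun p => (pvLabel p, [p.1, p.2]))) (fun t => t.1) false =
      pvF 0 l ++ pvF 1 l ++ pvF 2 l := by
  rw [PySem.List.sorted_eq_foldl_insertBy]
  have := sortFold_eq l [] [] [] (by simp) (by simp) (by simp)
  simpa [pvTag] using this

theorem map_fst_pvF (i : Int) (l : List (Int × Int)) :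
    (pvF i l).map (fun t => t.1) = List.replicate (pvF i l).length i := by
  rw [List.eq_replicate_iff]
  refine ⟨by simp, ?_⟩
  intro b hb
  simp only [pvF, List.map_map, List.mem_map, List.mem_filter] at hb
  obtain ⟨p, ⟨_, hp⟩, rfl⟩ := hb
  simpa [pvTag] using hp

theorem count_keys (j : Int) (l : List (Int × Int)) :
    ((pvF 0 l ++ pvF 1 l ++ pvF 2 l).map (fun t => t.1)).count j =
      (if j = 0 then (pvF 0 l).length else 0) +
      (if j = 1 then (pvF 1 l).length else 0) +
      (if j = 2 then (pvF 2 l).length else 0) := by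
  simp only [List.map_append, List.count_append, map_fst_pvF, List.count_replicate]
  split_ifs <;> simp_all

theorem map_snd_pvF (i : Int) (l : List (Int × Int)) :
    (pvF i l).map (fun t => t.2) = (l.filter (fun p => pvLabel p == i)).map (fun p => [p.1, p.2]) := by
  simp [pvF, List.map_map, pvTag]

theorem length_pvF (i : Int) (l : List (Int × Int)) :
    (pvF i l).length = (l.filter (fun p => pvLabel p == i)).length := by
  simp [pvF]

theorem slice3_b {a : Type} (M0 M1 M2 : List a) (n0 n1 : Nat)
    (h0 : M0.length = n0) (h1 : M1.length = n1) :
    PySem.List.slice (M0 ++ (M1 ++ M2)) (some (n0 : Int)) ((some ((n0 : Int) + (n1 : Int)))) = M1 := by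
  rw [← Nat.cast_add, PySem.List.slice_natCast, ← h0, ← h1, List.drop_left]
  have h : M0.length + M1.length - M0.length = M1.length := by omega
  rw [h, List.take_left]

theorem slice3_c {a : Type} (M0 M1 M2 : List a) (n0 n1 : Nat)
    (h0 : M0.length = n0) (h1 : M1.length = n1) :
    PySem.List.slice (M0 ++ (M1 ++ M2)) (some ((n0 : Int) + (n1 : Int))) none = M2 := by
  rw [← Nat.cast_add, PySem.List.slice_from_natCast, ← h0, ← h1]
  rw [show M0 ++ (M1 ++ M2) = (M0 ++ M1) ++ M2 by simp,
    show M0.length + M1.length = (M0 ++ M1).length by simp]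
  exact List.drop_left

-- ===== VERDICT (by name: the statement is the Claim_ definition above) =====
theorem clasterizatoin1_spec : Claim_equal_clasterizatoin1 := by
  intro data _
  unfold Spec_clasterizatoin1 clasterizatoin1 clasterizatoin1_alt
  rw [clasterizatoin1Loop_eq, sorted_eq_blocks]
  dsimp only
  simp only [List.nil_append]
  rw [PySem.List.count_eq, PySem.List.count_eq, count_keys, count_keys]
  norm_num
  simp only [map_snd_pvF, length_pvF]
  refine ⟨trivial, (slice3_b _ _ _ _ _ (by simp) (by simp)).symm, (slice3_c _ _ _ _ _ (by simp) (by simp)).symm⟩
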